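-- pv_equiv track=rewrite | github.com/FatosTorba/SHTC | metrics/metric_utils.py | get_depth
-- ===== SOURCE A (Python) =====
-- def get_depth(target_per_level_indexes):
--     depth = len(target_per_level_indexes)
--     while depth > 0:
--         if target_per_level_indexes[depth - 1]:
--             return depth
--         else:
--             depth += -1
--     return depth
-- ===== SOURCE B (Python) =====
-- def get_depth(target_per_level_indexes):
--     depth = 0
--     for i, v in enumerate(target_per_level_indexes):
--         if v:
--             depth = i + 1
--     return depth
-- ===== Notes on version B (the rewrite author's own statement) =====
-- stated objective: idiomatic
-- what changed: Replaced the backward while-loop with early return by a forward enumerate pass that keeps the 1-based index of the last non-empty level seen.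
import Mathlib
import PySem

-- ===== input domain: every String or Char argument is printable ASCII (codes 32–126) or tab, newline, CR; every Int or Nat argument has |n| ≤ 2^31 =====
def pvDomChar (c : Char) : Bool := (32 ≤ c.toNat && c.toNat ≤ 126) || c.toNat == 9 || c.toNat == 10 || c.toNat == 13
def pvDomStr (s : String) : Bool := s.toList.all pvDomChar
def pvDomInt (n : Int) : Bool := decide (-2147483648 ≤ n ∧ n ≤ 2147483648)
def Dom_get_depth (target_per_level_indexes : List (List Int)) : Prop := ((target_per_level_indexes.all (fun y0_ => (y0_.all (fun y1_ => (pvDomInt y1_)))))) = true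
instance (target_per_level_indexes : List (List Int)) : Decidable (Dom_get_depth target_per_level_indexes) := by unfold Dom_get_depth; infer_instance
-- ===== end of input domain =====

-- B replaces A's backward while-loop with early return by a forward enumerate pass
-- keeping the 1-based index of the last non-empty level (idiomatic; same behaviour).

-- ===== PORT A =====
-- while depth > 0: check target_per_level_indexes[depth-1]; truthy list ⇒ return depth, else depth -= 1
def getDepthWhile (xs : List (List Int)) : Nat → Int
  | 0 => 0
  | d + 1 => if xs.getD d [] ≠ [] then ((d : Int) + 1) else getDepthWhile xs d

def get_depth (target_per_level_indexes : List (List Int)) : Int :=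
  getDepthWhile target_per_level_indexes target_per_level_indexes.length

-- ===== PORT B =====
def get_depth_alt (target_per_level_indexes : List (List Int)) : Int :=
  (PySem.List.enumerate target_per_level_indexes 0).foldl
    (fun depth p => if p.2 ≠ [] then p.1 + 1 else depth) 0

-- ===== PRECONDITION & SPEC =====
def Spec_get_depth (target_per_level_indexes : List (List Int)) (out : Int) : Prop := out = get_depth_alt target_per_level_indexes
instance (target_per_level_indexes : List (List Int)) (out : Int) : Decidable (Spec_get_depth target_per_level_indexes out) := by unfold Spec_get_depth; infer_instance

-- ===== CLAIM (what is proved, stated in full; the proofs are below) =====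
def Claim_equal_get_depth : Prop := ∀ (target_per_level_indexes : List (List Int)), Dom_get_depth target_per_level_indexes → Spec_get_depth target_per_level_indexes (get_depth target_per_level_indexes)

-- ===== LEMMAS AND PROOFS =====

-- the backward scan over xs ++ [v] coincides with the one over xs below xs.length
theorem getDepthWhile_append (xs : List (List Int)) (v : List Int) (d : Nat)
    (hd : d ≤ xs.length) : getDepthWhile (xs ++ [v]) d = getDepthWhile xs d := by
  induction d with
  | zero => rfl
  | succ d ih =>
    have hlt : d < xs.length := hd
    simp [getDepthWhile, List.getD, List.getElem?_append_left hlt, ih (Nat.le_of_lt hlt)]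

theorem get_depth_append (xs : List (List Int)) (v : List Int) :
    get_depth (xs ++ [v]) = if v ≠ [] then ((xs.length : Int) + 1) else get_depth xs := by
  unfold get_depth
  have : (xs ++ [v]).length = xs.length + 1 := by simp
  rw [this]
  have hget : (xs ++ [v]).getD xs.length [] = v := by
    simp [List.getD, List.getElem?_append_right le_rfl]
  by_cases hv : v = []
  · subst hv
    simp [getDepthWhile, hget, getDepthWhile_append xs [] xs.length le_rfl]
  · simp [getDepthWhile, hget, hv]

theorem get_depth_alt_append (xs : List (List Int)) (v : List Int) :
    get_depth_alt (xs ++ [v]) = if v ≠ [] then ((xs.length : Int) + 1) else get_depth_alt xs := by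
  unfold get_depth_alt
  rw [PySem.List.enumerate_append, List.foldl_append]
  by_cases hv : v = [] <;> simp [hv, PySem.List.enumerate]

theorem get_depth_eq_alt (xs : List (List Int)) : get_depth xs = get_depth_alt xs := by
  induction xs using List.reverseRecOn with
  | nil => rfl
  | append_singleton xs v ih => rw [get_depth_append, get_depth_alt_append, ih]

-- ===== VERDICT (by name: the statement is the Claim_ definition above) =====
theorem get_depth_spec : Claim_equal_get_depth := by
  intro xs _
  exact get_depth_eq_alt xs
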